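-- pv_equiv track=rewrite | github.com/folkehelseinstituttet/niph_tb_pipeline | niph_tb_pipeline/niph_tb_pipeline.py | NumberRelated
-- ===== SOURCE A (Python) =====
-- def NumberRelated(sample, dists):
--     related = {"close": 0, "somewhat" : 0}
--     for key in dists:
--         if key == sample:
--             continue
--         if int(dists[key]) <= 30:
--             if int(dists[key]) > 5:
--                 related["somewhat"] += 1
--             else:
--                 related["close"] += 1
--                 related["somewhat"] += 1
--     return related
-- ===== SOURCE B (Python) =====
-- def NumberRelated(sample, dists):
--     close = sum(1 for k, v in dists.items() if k != sample and int(v) <= 5)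
--     somewhat = sum(1 for k, v in dists.items() if k != sample and int(v) <= 30)
--     return {"close": close, "somewhat": somewhat}
-- ===== Notes on version B (the rewrite author's own statement) =====
-- stated objective: simpler
-- what changed: Replaces the single pass with interleaved, mutually-nested counter updates by two independent aggregations over the items: close counts values <= 5 and somewhat counts values <= 30, each skipping the sample key.
import Mathlib
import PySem

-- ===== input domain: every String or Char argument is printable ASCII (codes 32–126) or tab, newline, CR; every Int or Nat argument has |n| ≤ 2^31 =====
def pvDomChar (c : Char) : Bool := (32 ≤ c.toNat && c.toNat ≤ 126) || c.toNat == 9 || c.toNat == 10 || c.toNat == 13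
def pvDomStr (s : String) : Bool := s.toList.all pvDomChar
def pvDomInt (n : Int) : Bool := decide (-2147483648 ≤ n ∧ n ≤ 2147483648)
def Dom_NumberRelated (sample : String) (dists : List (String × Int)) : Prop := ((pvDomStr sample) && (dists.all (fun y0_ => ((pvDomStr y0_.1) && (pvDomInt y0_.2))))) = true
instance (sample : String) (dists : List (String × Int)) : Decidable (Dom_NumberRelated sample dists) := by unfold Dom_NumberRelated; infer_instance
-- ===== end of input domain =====

-- B replaces A's single interleaved-counter loop by two independent counts (close: ≤ 5, somewhat: ≤ 30); objective: simpler.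

-- ===== PORT A =====
-- one loop iteration of A's for-loop body (related is the dict A mutates)
def pvStepA (sample : String) (d : PySem.Dict String Int)
    (related : PySem.Dict String Int) (key : String) : PySem.Dict String Int :=
  if key = sample then related
  else if d.getD key 0 ≤ 30 then
    if d.getD key 0 > 5 then
      related.insert "somewhat" (related.getD "somewhat" 0 + 1)
    else
      let r1 := related.insert "close" (related.getD "close" 0 + 1)
      r1.insert "somewhat" (r1.getD "somewhat" 0 + 1)
  else related

def NumberRelated (sample : String) (dists : List (String × Int)) : List (String × Int) :=
  let d := PySem.Dict.ofList dists
  let related := PySem.Dict.ofList [("close", (0 : Int)), ("somewhat", (0 : Int))]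
  (d.keys.foldl (pvStepA sample d) related).items

-- ===== PORT B =====
def NumberRelated_alt (sample : String) (dists : List (String × Int)) : List (String × Int) :=
  let items := (PySem.Dict.ofList dists).items
  let close : Int := ((items.countP (fun p => p.1 ≠ sample ∧ p.2 ≤ 5) : Nat) : Int)
  let somewhat : Int := ((items.countP (fun p => p.1 ≠ sample ∧ p.2 ≤ 30) : Nat) : Int)
  [("close", close), ("somewhat", somewhat)]

-- ===== PRECONDITION & SPEC =====
def Spec_NumberRelated (sample : String) (dists : List (String × Int)) (out : List (String × Int)) : Prop := out = NumberRelated_alt sample dists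
instance (sample : String) (dists : List (String × Int)) (out : List (String × Int)) : Decidable (Spec_NumberRelated sample dists out) := by unfold Spec_NumberRelated; infer_instance

-- ===== CLAIM (what is proved, stated in full; the proofs are below) =====
def Claim_equal_NumberRelated : Prop := ∀ (sample : String) (dists : List (String × Int)), Dom_NumberRelated sample dists → Spec_NumberRelated sample dists (NumberRelated sample dists)

-- ===== LEMMAS AND PROOFS =====

lemma pvLoop_items (sample : String) (d : PySem.Dict String Int) :
    ∀ (ks : List String) (c s : Int),
      (ks.foldl (pvStepA sample d) (PySem.Dict.mk [("close", c), ("somewhat", s)])).items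
        = [("close", c + (ks.countP (fun k => k ≠ sample ∧ d.getD k 0 ≤ 5) : Int)),
           ("somewhat", s + (ks.countP (fun k => k ≠ sample ∧ d.getD k 0 ≤ 30) : Int))] := by
  intro ks
  induction ks with
  | nil => intro c s; simp
  | cons k ks ih =>
      intro c s
      by_cases hk : k = sample
      · simp [List.foldl, pvStepA, hk, ih]
      · by_cases h30 : d.getD k 0 ≤ 30
        · by_cases h5 : d.getD k 0 > 5
          · have hstep : pvStepA sample d (PySem.Dict.mk [("close", c), ("somewhat", s)]) k
                = PySem.Dict.mk [("close", c), ("somewhat", s + 1)] := by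
              unfold pvStepA
              rw [if_neg hk, if_pos h30, if_pos h5]
              simp [PySem.Dict.insert, PySem.Dict.getD, PySem.Dict.get?, PySem.Dict.contains]
            simp only [List.foldl, hstep, ih]
            have h5' : ¬ d.getD k 0 ≤ 5 := by omega
            simp [hk, h30, h5']
            omega
          · have hstep : pvStepA sample d (PySem.Dict.mk [("close", c), ("somewhat", s)]) k
                = PySem.Dict.mk [("close", c + 1), ("somewhat", s + 1)] := by
              unfold pvStepA
              rw [if_neg hk, if_pos h30, if_neg h5]
              simp [PySem.Dict.insert, PySem.Dict.getD, PySem.Dict.get?, PySem.Dict.contains]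
            simp only [List.foldl, hstep, ih]
            have h5' : d.getD k 0 ≤ 5 := by omega
            simp [hk, h30, h5']
            omega
        · have hstep : pvStepA sample d (PySem.Dict.mk [("close", c), ("somewhat", s)]) k
              = PySem.Dict.mk [("close", c), ("somewhat", s)] := by
            unfold pvStepA
            rw [if_neg hk, if_neg h30]
          simp only [List.foldl, hstep, ih]
          have h5' : ¬ d.getD k 0 ≤ 5 := by omega
          simp [hk, h30, h5']

-- counting over keys equals counting over items (keys of ofList are nodup)
lemma pvCount_keys_items (sample : String) (d : PySem.Dict String Int) (hnd : d.keys.Nodup) (t : Int) :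
    (d.keys.countP (fun k => k ≠ sample ∧ d.getD k 0 ≤ t))
      = d.items.countP (fun p => p.1 ≠ sample ∧ p.2 ≤ t) := by
  rw [PySem.Dict.items_eq_map_keys d hnd 0, List.countP_map]
  rfl

-- ===== VERDICT (by name: the statement is the Claim_ definition above) =====
theorem NumberRelated_spec : Claim_equal_NumberRelated := by
  intro sample dists _
  unfold Spec_NumberRelated NumberRelated NumberRelated_alt
  have h0 : (PySem.Dict.ofList [("close", (0 : Int)), ("somewhat", (0 : Int))])
      = PySem.Dict.mk [("close", (0 : Int)), ("somewhat", (0 : Int))] := by decide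
  rw [h0, pvLoop_items sample (PySem.Dict.ofList dists) (PySem.Dict.ofList dists).keys 0 0,
    pvCount_keys_items sample _ (PySem.Dict.nodup_keys_ofList dists) 5,
    pvCount_keys_items sample _ (PySem.Dict.nodup_keys_ofList dists) 30]
  simp
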